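/- GENERATED by mk_final_copies.py from the proof of the farm's unit `inverse_mdct.8` (farm:inverse_mdct.8.1: Proof.lean) as the
   re-elaboration sweep compiled it — do not edit. -/
import Asan.CheckWalk
import Vorbis.Spec.MdctUse
import Vorbis.Spec.Units.inverse_mdct_8
import Vorbis.Spec.Worked.inverse_mdct_8_Lemmas

open X86 X86.User Asan Vorbis Vorbis.Spec

set_option maxRecDepth 4000
set_option maxHeartbeats 16000000

namespace Vorbis.Spec.inverse_mdct_8

end Vorbis.Spec.inverse_mdct_8

/-- Segment 8 of `inverse_mdct` (`loop8` 0x109adb … `jmp loop9` 0x109b19): the step-4-5-6 loop (line 2819 `while (d0 >= v)`), the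
load of `C[bt]` and the step-7 set-up. THE LOOP INVARIANT after `t ≤ n/16` iterations is the entry assertion `At8` with
`rbx + 16 t + 16 = v + n`, `r12 + 16 t + 16 = v + 2 n`, `q[rbp−40H] = R + 4 t` (`Mdct.S456`); it speaks of the function's entry
state `ue` only, so it is carried by `Body.carry` (`carry_back` of Lemmas.lean). The measure is `rbx + 16 − v`. One iteration is
walked in three stages (the test; `k4 = bitrev[0]` and its four copies; `k4 = bitrev[1]` and its four copies), the memory being
re-abstracted in between, so that the walker's context holds at most two case-splitting facts at a time. -/
theorem Vorbis.Spec.Worked.inverse_mdct_8_ok : Vorbis.Spec.inverse_mdct_8.Statement := by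
  intro Lay hLay μ hμ u₀ hcode h2 h4 hs4 h8 others frames len A stored room ysz k c ue ret v hat
  obtain ⟨hrip, hbody, hsBuf, hsS2, hrSlot, hd1Slot, hoffSlot, hrbx, hr12, hr13⟩ := hat
  have hp := hbody.pre
  have he := hbody.entry
  v_entry he
  -- the geometry, as linear facts (the case-splitting ones are brought in where they are needed)
  have hN := hp.isBlocksize.facts
  have hr := hp.tmp_range
  have hAR1 := hp.ado.ok.AR1
  have hAR2 := hp.ado.ok.AR2
  have hAT := hp.arenaText
  have hnle := hp.n_le
  have hbt := hp.btLt
  have hRin := hp.ok.inside _ hp.tabR_blk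
  have hUin := hp.ok.inside _ hp.buf_blk
  have hFin := hp.ok.inside _ hp.ob1
  simp only [vblock, voff, Vorbis.L.textHi] at hRin hUin hFin hAT
  have hBt := Vorbis.Spec.inverse_mdct_8.sx32 (inverse_mdct.bt ue) (by omega)
  have hfdef := inverse_mdct.f_def ue
  -- the live ranges of the check sites: the table `R`, the sample buffer `u`, the temp block `v`, `*f`
  have hLR : LiveBytes (A.newTempObj (2 * inverse_mdct.n ue) :: others) frames (inverse_mdct.tabR ue) (inverse_mdct.n ue / 4) :=
    LiveBytes.of_block (hp.blkLive _ _ hp.tabR_blk) (Nat.le_refl _) (Nat.le_refl _)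
  have hLU : LiveBytes (A.newTempObj (2 * inverse_mdct.n ue) :: others) frames (inverse_mdct.buf ue)
      (4 * bsize ue.mem (inverse_mdct.f ue) 1) :=
    LiveBytes.of_block (hp.blkLive _ _ hp.buf_blk) (Nat.le_refl _) (Nat.le_refl _)
  have hLV := inverse_mdct.tmp_live (others := others) (frames := frames) A ue
  have hLF : LiveBytes (A.newTempObj (2 * inverse_mdct.n ue) :: others) frames (inverse_mdct.f ue) 1808 :=
    LiveBytes.of_block (hp.blkLive _ _ hp.ob1) (Nat.le_refl _) (Nat.le_refl _)
  -- 0x109adb, line 2819: the loop head; the number `t` of iterations done is generalised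
  obtain ⟨t, ht, hR, hrbx', hr12'⟩ : ∃ t : Nat, t ≤ inverse_mdct.n ue / 16 ∧
      v.mem.readLE (ue.reg .rsp - 72) 8 = inverse_mdct.tabR ue + 4 * t ∧
      (v.reg .rbx).toNat + 16 * t + 16 = inverse_mdct.tmp A ue + 4 * (inverse_mdct.n ue / 4) ∧
      (v.reg .r12).toNat + 16 * t + 16 = inverse_mdct.tmp A ue + 4 * (inverse_mdct.n ue / 2) :=
    ⟨0, Nat.zero_le _, hrSlot, hrbx, hr12⟩
  clear hrSlot hrbx hr12
  u_loop [t] (fun w => (w.reg .rbx).toNat + 16 - inverse_mdct.tmp A ue)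
  -- the present state under the walker's names, the slots the code loads
  have c_rip := hrip
  have c_rsp := hbody.rsp
  have c_rbp := hbody.rbp
  have c_eq : Mem.EqOn Vorbis.L.textLo Vorbis.L.textHi u₀.mem v.mem := hbody.code
  have hdf : v.flags .df = false := hbody.abi.1
  have hmx : v.mxcsr &&& 0x1F80 = 0x1F80 := hbody.abi.2
  have hsse := Vorbis.sseOK_of_abiInv hbody.abi
  have svs := hbody.vSlot
  have sf := hbody.fSlot
  have sbt := hbody.btSlot
  obtain ⟨d1, hd1⟩ : ∃ x, v.mem.readLE (ue.reg .rsp - 88) 8 = x := ⟨_, rfl⟩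
  rw [hd1] at hd1Slot
  obtain ⟨off, hoff⟩ : ∃ x, v.mem.readLE (ue.reg .rsp - 96) 8 = x := ⟨_, rfl⟩
  rw [hoff] at hoffSlot
  have hFS := hp.offStack _ hp.ob1
  simp only [vblock, voff] at hFS
  -- STAGE 1, 0x109adb … 0x109ae2: the test `d0 >= v`; the exit arm is walked to `jmp loop9`
  u_walk hcode [hμ.vendor] until [(Nat.sub Vorbis.L.inverse_mdct.chk37.toNat 7), Vorbis.L.inverse_mdct.loop9] span [Vorbis.L.textLo, Vorbis.L.textHi] side (v_side)
  case check_109b03 =>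
    -- 0x109b03, line 2848: `f->C[bt]`, a field of `*f`
    have hun : ShadowUntouched v.mem s_109b03.mem := by v_untouched
    exact hLF.accSmall hbody.shadow hun _ 8 (by decide) (by u_omega) (by u_omega)
  · -- THE BODY, 0x1099b9: `t < n/16`
    have htlt : t < inverse_mdct.n ue / 16 := by
      clear hFS
      u_omega
    clear hFS hFin hBt hfdef
    -- M4: the two table entries of this iteration, read in the head's memory
    have hrev := hbody.rev
    obtain ⟨k4a, hk4a⟩ : ∃ x, v.mem.readLE (UInt64.ofNat (inverse_mdct.tabR ue + 4 * t)) 2 = x := ⟨_, rfl⟩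
    obtain ⟨k4b, hk4b⟩ : ∃ x, v.mem.readLE (UInt64.ofNat (inverse_mdct.tabR ue + 4 * t) + 2) 2 = x := ⟨_, rfl⟩
    have hka : k4a ≤ inverse_mdct.n ue / 2 - 4 := by
      have h1 := hrev (2 * t) (by omega)
      unfold Mem.u16 addr at h1
      have e : inverse_mdct.tabR ue + 2 * (2 * t) = inverse_mdct.tabR ue + 4 * t := by omega
      rw [e, hk4a] at h1
      exact h1
    have hkb : k4b ≤ inverse_mdct.n ue / 2 - 4 := by
      have h1 := hrev (2 * t + 1) (by omega)
      unfold Mem.u16 addr at h1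
      have e : inverse_mdct.tabR ue + 2 * (2 * t + 1) = inverse_mdct.tabR ue + 4 * t + 2 := by omega
      rw [e, UInt64.ofNat_add] at h1
      change v.mem.readLE (UInt64.ofNat (inverse_mdct.tabR ue + 4 * t) + 2) 2 ≤ _ at h1
      rw [hk4b] at h1
      exact h1
    clear hrev
    have hKa := Vorbis.Spec.inverse_mdct_8.zx16 k4a (by omega)
    have hKb := Vorbis.Spec.inverse_mdct_8.zx16 k4b (by omega)
    have hRS := hp.offStack _ hp.tabR_blk
    simp only [vblock] at hRS
    -- STAGE 2, 0x1099b9 … 0x109a41, lines 2822–2826: `k4 = bitrev[0]`, four floats of `u` copied to `d1[3] d1[2] d0[3] d0[2]`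
    u_walk hcode [hμ.vendor] until [(Nat.sub Vorbis.L.inverse_mdct.chk46.toNat 8)] span [Vorbis.L.textLo, Vorbis.L.textHi] side (v_side)
    case check_1099c0 =>
      have hun : ShadowUntouched v.mem s_1099c0.mem := by v_untouched
      exact hLR.accSmall hbody.shadow hun _ 2 (by decide) (by u_omega) (by u_omega)
    case check_1099d5 =>
      have hun : ShadowUntouched v.mem s_1099d5.mem := by v_untouched
      exact hLU.accSmall hbody.shadow hun _ 4 (by decide) (by u_omega) (by u_omega)
    case check_1099e2 =>
      have hun : ShadowUntouched v.mem s_1099e2.mem := by v_untouched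
      exact hLV.accSmall hbody.shadow hun _ 4 (by decide) (by u_omega) (by u_omega)
    case check_1099f4 =>
      have hun : ShadowUntouched v.mem s_1099f4.mem := by v_untouched
      exact hLU.accSmall hbody.shadow hun _ 4 (by decide) (by u_omega) (by u_omega)
    case check_109a01 =>
      have hun : ShadowUntouched v.mem s_109a01.mem := by v_untouched
      exact hLV.accSmall hbody.shadow hun _ 4 (by decide) (by u_omega) (by u_omega)
    case check_109a13 =>
      have hun : ShadowUntouched v.mem s_109a13.mem := by v_untouched
      exact hLU.accSmall hbody.shadow hun _ 4 (by decide) (by u_omega) (by u_omega)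
    case check_109a1f =>
      have hun : ShadowUntouched v.mem s_109a1f.mem := by v_untouched
      exact hLV.accSmall hbody.shadow hun _ 4 (by decide) (by u_omega) (by u_omega)
    case check_109a30 =>
      have hun : ShadowUntouched v.mem s_109a30.mem := by v_untouched
      exact hLU.accSmall hbody.shadow hun _ 4 (by decide) (by u_omega) (by u_omega)
    case check_109a3c =>
      have hun : ShadowUntouched v.mem s_109a3c.mem := by v_untouched
      exact hLV.accSmall hbody.shadow hun _ 4 (by decide) (by u_omega) (by u_omega)
    -- 0x109a45: the memory re-abstracted — what the first half wrote, the table pointer's slot, the second table entry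
    have hsame1 : Mem.SameExcept
        [⟨(ue.reg .rsp).toNat - 192, (ue.reg .rsp).toNat - 184⟩,
         ⟨(ue.reg .rsp).toNat - 72, (ue.reg .rsp).toNat - 64⟩,
         ⟨inverse_mdct.tmp A ue, inverse_mdct.tmp A ue + 2 * inverse_mdct.n ue⟩] v.mem s_109a41.mem := by
      u_same
    have hun1 : ShadowUntouched v.mem s_109a41.mem := by v_untouched
    have hTS := Vorbis.Spec.inverse_mdct_8.tmp_off_stack hp
    have hR1 : s_109a41.mem.readLE (ue.reg .rsp - 72) 8 = inverse_mdct.tabR ue + 4 * t := by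
      u_resolve
      u_omega
    have hk4b1 : s_109a41.mem.readLE (UInt64.ofNat (inverse_mdct.tabR ue + 4 * t) + 2) 2 = k4b := by
      rw [Vorbis.Spec.inverse_mdct_8.table_read hbody hsame1 _ (by u_omega) (by u_omega)]
      exact hk4b
    clear w_mem hk4a hk4b hKa hka w_r15 w_r14
    obtain ⟨x15, w_r15⟩ : ∃ x, s_109a41.reg .r15 = x := ⟨_, rfl⟩
    obtain ⟨x14, w_r14⟩ : ∃ x, s_109a41.reg .r14 = x := ⟨_, rfl⟩
    -- STAGE 3, 0x109a45 … 0x109ad6, lines 2828–2836: `k4 = bitrev[1]`, four floats copied to `d1[1] d1[0] d0[1] d0[0]`, the steps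
    u_walk hcode [hμ.vendor] until [Vorbis.L.inverse_mdct.loop8] span [Vorbis.L.textLo, Vorbis.L.textHi] side (v_side)
    case check_109a4d =>
      have hun : ShadowUntouched v.mem s_109a4d.mem := by v_untouched
      exact hLR.accSmall hbody.shadow hun _ 2 (by decide) (by u_omega) (by u_omega)
    case check_109a63 =>
      have hun : ShadowUntouched v.mem s_109a63.mem := by v_untouched
      exact hLU.accSmall hbody.shadow hun _ 4 (by decide) (by u_omega) (by u_omega)
    case check_109a70 =>
      have hun : ShadowUntouched v.mem s_109a70.mem := by v_untouched
      exact hLV.accSmall hbody.shadow hun _ 4 (by decide) (by u_omega) (by u_omega)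
    case check_109a82 =>
      have hun : ShadowUntouched v.mem s_109a82.mem := by v_untouched
      exact hLU.accSmall hbody.shadow hun _ 4 (by decide) (by u_omega) (by u_omega)
    case check_109a8d =>
      have hun : ShadowUntouched v.mem s_109a8d.mem := by v_untouched
      exact hLV.accSmall hbody.shadow hun _ 4 (by decide) (by u_omega) (by u_omega)
    case check_109a9e =>
      have hun : ShadowUntouched v.mem s_109a9e.mem := by v_untouched
      exact hLU.accSmall hbody.shadow hun _ 4 (by decide) (by u_omega) (by u_omega)
    case check_109aaa =>
      have hun : ShadowUntouched v.mem s_109aaa.mem := by v_untouched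
      exact hLV.accSmall hbody.shadow hun _ 4 (by decide) (by u_omega) (by u_omega)
    case check_109abb =>
      have hun : ShadowUntouched v.mem s_109abb.mem := by v_untouched
      exact hLU.accSmall hbody.shadow hun _ 4 (by decide) (by u_omega) (by u_omega)
    case check_109ac6 =>
      have hun : ShadowUntouched v.mem s_109ac6.mem := by v_untouched
      exact hLV.accSmall hbody.shadow hun _ 4 (by decide) (by u_omega) (by u_omega)
    -- THE BACK EDGE, 0x109adb: the invariant for `t + 1`, by the frame rule of an iteration (`carry_back`)
    have hs : Mem.SameExcept
        [⟨(ue.reg .rsp).toNat - 192, (ue.reg .rsp).toNat - 184⟩,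
         ⟨(ue.reg .rsp).toNat - 72, (ue.reg .rsp).toNat - 64⟩,
         ⟨inverse_mdct.tmp A ue, inverse_mdct.tmp A ue + 2 * inverse_mdct.n ue⟩] v.mem s_109ad6.mem := by
      u_same
    have hinv : abiInv s_109ad6 := by v_inv
    have hrbp : s_109ad6.reg .rbp = ue.reg .rsp - 8 := by
      rw [w_kept.get .rbp rfl]
      exact c_rbp
    have hd1v : v.mem.readLE (ue.reg .rsp - 88) 8 + 16 = inverse_mdct.tmp A ue + 4 * (inverse_mdct.n ue / 2) := by
      rw [hd1]
      exact hd1Slot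
    have hoffv : v.mem.readLE (ue.reg .rsp - 96) 8 + 16 = 4 * (inverse_mdct.n ue / 2) := by
      rw [hoff]
      exact hoffSlot
    obtain ⟨hb', hsb', hs2', hd1', hoff'⟩ :=
      Vorbis.Spec.inverse_mdct_8.carry_back hbody hsBuf hsS2 hd1v hoffv hs w_eq hinv hrbp w_rsp
    have hR' : s_109ad6.mem.readLE (ue.reg .rsp - 72) 8 = inverse_mdct.tabR ue + 4 * (t + 1) := by
      u_resolve
      rw [BitVec.toNat_add, BitVec.toNat_ofNat, UInt64.toNat_ofNat']
      simp only [BitVec.toNat_ofNat, Nat.reducePow, Nat.reduceMod]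
      omega
    refine ReachVia.done (Or.inr ⟨⟨t + 1, w_rip, hb', hsb', hs2', hd1', hoff', ?_, ?_, hR', ?_, ?_⟩, ?_⟩)
    · rw [w_kept.get .r13 rfl]
      exact hr13
    · omega
    · rw [w_rbx]
      u_omega
    · rw [w_r12]
      u_omega
    · rw [w_rbx]
      u_omega
  · -- THE EXIT, 0x109ae8 … 0x109b19, lines 2848–2854: `C = f->C[bt]`, `d = v`, `e = v + n2 − 4`; the assertion of `loop9`
    have hs : Mem.SameExcept
        [⟨(ue.reg .rsp).toNat - 368, (ue.reg .rsp).toNat⟩,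
         ⟨inverse_mdct.buf ue, inverse_mdct.buf ue + 4 * inverse_mdct.n ue⟩,
         ⟨inverse_mdct.tmp A ue, inverse_mdct.tmp A ue + 2 * inverse_mdct.n ue⟩] v.mem s_109b19.mem := by
      u_same
    have hinv : abiInv s_109b19 := by v_inv
    have hrbp : s_109b19.reg .rbp = ue.reg .rsp - 8 := by
      rw [w_kept.get .rbp rfl]
      exact c_rbp
    have hb' := hbody.carry hs w_eq hinv hrbp w_rsp
      (by u_resolve; first | done | exact hbody.retSlot)
      (by u_resolve; first | done | exact hbody.rbpSlot)
      (by u_resolve; first | done | exact hbody.r15Slot)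
      (by u_resolve; first | done | exact hbody.r14Slot)
      (by u_resolve; first | done | exact hbody.r13Slot)
      (by u_resolve; first | done | exact hbody.r12Slot)
      (by u_resolve; first | done | exact hbody.rbxSlot)
      (by u_resolve; first | done | exact hbody.fSlot)
      (by u_resolve; first | done | exact hbody.btSlot)
      (by u_resolve; first | done | exact hbody.saveSlot)
      (by u_resolve; first | done | exact hbody.vSlot)
    refine ReachVia.done (Or.inl ⟨w_rip, hb', ⟨?_, ?_, ?_⟩, ⟨?_, ?_⟩, ?_, ?_, ?_, ?_⟩)
    · u_resolve
      first | done | exact hsBuf.uSlot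
    · u_resolve
      first | done | exact hsBuf.nSlot
    · u_resolve
      first | done | exact hsBuf.uMidSlot
    · u_resolve
      first | done | exact hsS2.n2x4m32Slot
    · u_resolve
      first | done | exact hsS2.n4x4Slot
    · -- `q[rbp − 70H] = 4·n2 − 16`
      u_resolve
      u_omega
    · rw [w_r14]
      u_omega
    · rw [w_r12]
      u_omega
    · -- `rbx = C`: the pointer read in `*f`
      rw [w_rbx]
      have hx : ue.reg .rdx + (Word.ofBV (BitVec.signExtend 64 (BitVec.ofNat 32 (inverse_mdct.bt ue))) + 178) * 8 + 8
          = addr (inverse_mdct.f ue + 1432 + 8 * inverse_mdct.bt ue) := by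
        apply eq_addr
        u_omega
      rw [hx]
      have hC := hbody.tabC_eq
      simp only [vacc, voff] at hC
      rw [Mem.readLE_addr8, UInt64.toNat_ofNat', Nat.mod_eq_of_lt (Mem.u64_lt _ _), hC]
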